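-- pv_equiv track=rewrite | github.com/LynPtl/AlgorithmStudy | 模拟考试/question_4.py | f
-- ===== SOURCE A (Python) =====
-- def f(L):
--     """
--     >>> f([])
--     []
--     >>> f([1])
--     [1]
--     >>> f([1, 2])
--     [1, 2]
--     >>> f([1, 2, 3])
--     [2, 3, 1]
--     >>> f([1, 2, 3, 4])
--     [2, 3, 1, 4]
--     >>> f([1, 2, 3, 4, 5])
--     [3, 4, 2, 5, 1]
--     >>> f([1, 2, 3, 4, 5, 6])
--     [3, 4, 2, 5, 1, 6]
--     >>> f([1, 2, 3, 4, 5, 6, 7])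
--     [4, 5, 3, 6, 2, 7, 1]
--     >>> f([-8, 6, 33, 0, 6, 5, 18, 14])
--     [0, 6, 33, 5, 6, 18, -8, 14]
--     >>> f([-8, 6, 33, 0, 6, 5, 18, 14, 5])
--     [6, 5, 0, 18, 33, 14, 6, 5, -8]
--     """
--     #如果是偶数，那么先取中间的两个，然后左指针-1 右指针+1 先读左后读右
--     #如果是奇数 先取中间的那一个，然后左指针-1 右指针+1，先读右后读左
--     #比如有六个 012345 那么开始的指针就是23 分别是6/2和6/2-1
--     #比如有五个 01234 那么开始的指针就是5//2
--     answer = []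
--     length = len(L)
--     if length == 0 or length == 1:
--         return L
--     if length % 2 == 0:
--         left = length//2 - 1
--         right = length//2
--         offset = 0
--         while offset + right < length:
--             answer.append(L[left-offset])
--             answer.append(L[right+offset])
--             offset += 1
--         return answer
--     else:
--         middle = length//2
--         answer = [L[middle]]
--         offset = 1
--         while offset + middle < length:
--             answer.append(L[middle+offset])
--             answer.append(L[middle-offset])
--             offset += 1
--         return answer
-- ===== SOURCE B (Python) =====
-- def f(L):
--     n = len(L)
--     if n <= 1:
--         return L
--     h = n // 2
--     if n % 2 == 0:
--         src = lambda j: h - 1 - j // 2 if j % 2 == 0 else h + j // 2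
--     else:
--         src = lambda j: h - j // 2 if j % 2 == 0 else h + (j + 1) // 2
--     return [L[src(j)] for j in range(n)]
-- ===== Notes on version B (the rewrite author's own statement) =====
-- stated objective: alternative
-- what changed: B replaces A's outward-walking offset-pointer loops with a closed-form index permutation: for each output position j it computes the source index directly and gathers the result in one comprehension.
import Mathlib
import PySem

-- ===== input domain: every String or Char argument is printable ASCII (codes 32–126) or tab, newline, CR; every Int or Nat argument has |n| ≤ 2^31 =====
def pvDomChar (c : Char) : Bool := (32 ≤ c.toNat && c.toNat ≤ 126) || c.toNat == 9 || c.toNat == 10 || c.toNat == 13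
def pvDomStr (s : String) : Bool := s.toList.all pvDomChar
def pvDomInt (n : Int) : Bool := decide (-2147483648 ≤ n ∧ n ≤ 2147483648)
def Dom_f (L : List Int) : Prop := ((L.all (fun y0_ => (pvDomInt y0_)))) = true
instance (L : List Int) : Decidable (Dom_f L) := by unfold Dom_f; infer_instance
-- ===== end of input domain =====

-- B computes, for each output position j, the closed-form source index of the input
-- element that lands there, and gathers the output in one comprehension — no outward
-- pointer walk and no interleaving of halves; objective: alternative (same O(n) cost).

-- ===== PORT A =====
-- A's while loop (even branch): indices left-offset / right+offset are always in
-- range while the loop runs, so pyGetD is exact there.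
def fLoopEven (L : List Int) (left right len offset : Int) (acc : List Int) : List Int :=
  if offset + right < len then
    fLoopEven L left right len (offset + 1)
      (acc ++ [PySem.List.pyGetD L (left - offset) 0, PySem.List.pyGetD L (right + offset) 0])
  else acc
termination_by (len - right - offset).toNat
decreasing_by omega

-- A's while loop (odd branch); indices middle±offset are always in range while it runs.
def fLoopOdd (L : List Int) (middle len offset : Int) (acc : List Int) : List Int :=
  if offset + middle < len then
    fLoopOdd L middle len (offset + 1)
      (acc ++ [PySem.List.pyGetD L (middle + offset) 0, PySem.List.pyGetD L (middle - offset) 0])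
  else acc
termination_by (len - middle - offset).toNat
decreasing_by omega

def f (L : List Int) : List Int :=
  let length : Int := L.length
  if length = 0 ∨ length = 1 then L
  else if PySem.Int.mod length 2 = 0 then
    let left := PySem.Int.floordiv length 2 - 1
    let right := PySem.Int.floordiv length 2
    fLoopEven L left right length 0 []
  else
    let middle := PySem.Int.floordiv length 2
    fLoopOdd L middle length 1 [PySem.List.pyGetD L middle 0]

-- ===== PORT B =====
-- closed-form source index for output position j (Source B's src lambdas)
def fSrc (n h j : Nat) : Nat :=
  if n % 2 = 0 then (if j % 2 = 0 then h - 1 - j / 2 else h + j / 2)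
  else (if j % 2 = 0 then h - j / 2 else h + (j + 1) / 2)

def f_alt (L : List Int) : List Int :=
  let n := L.length
  if n ≤ 1 then L
  else (List.range n).map (fun j => L.getD (fSrc n (n / 2) j) 0)

-- ===== PRECONDITION & SPEC =====
def Spec_f (L : List Int) (out : List Int) : Prop := out = f_alt L
instance (L : List Int) (out : List Int) : Decidable (Spec_f L out) := by unfold Spec_f; infer_instance

-- ===== CLAIM (what is proved, stated in full; the proofs are below) =====
def Claim_equal_f : Prop := ∀ (L : List Int), Dom_f L → Spec_f L (f L)

-- ===== LEMMAS AND PROOFS =====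

-- A flatMap of two-element blocks is a map over twice the range, dispatching on parity.
theorem flatMap_blocks (a b : Nat → Int) :
    ∀ k : Nat, (List.range k).flatMap (fun o => [a o, b o])
      = (List.range (2 * k)).map (fun j => if j % 2 = 0 then a (j / 2) else b (j / 2)) := by
  intro k
  induction k with
  | zero => simp
  | succ k ih =>
    have h2 : 2 * (k + 1) = (2 * k + 1) + 1 := by ring
    rw [List.range_succ, List.flatMap_append, ih, h2, List.range_succ, List.range_succ]
    simp only [List.map_append, List.flatMap_cons, List.flatMap_nil, List.append_nil,
      List.map_cons, List.map_nil]
    have e1 : (2 * k) % 2 = 0 := by omega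
    have e2 : ¬ (2 * k + 1) % 2 = 0 := by omega
    have e3 : (2 * k) / 2 = k := by omega
    have e4 : (2 * k + 1) / 2 = k := by omega
    rw [if_pos e1, if_neg e2, e3, e4]
    simp

-- A's even-branch loop, as an indexed comprehension over the remaining iteration count.
theorem fLoopEven_eq (L : List Int) (left right len : Int) :
    ∀ (k : Nat) (offset : Int) (acc : List Int), (len - right - offset).toNat = k →
    fLoopEven L left right len offset acc
      = acc ++ (List.range k).flatMap
          (fun o : Nat => [PySem.List.pyGetD L (left - offset - (o : Int)) 0,
                     PySem.List.pyGetD L (right + offset + (o : Int)) 0]) := by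
  intro k
  induction k with
  | zero =>
    intro offset acc hk
    rw [fLoopEven]
    simp only [if_neg (by omega : ¬ offset + right < len)]
    simp
  | succ k ih =>
    intro offset acc hk
    rw [fLoopEven]
    simp only [if_pos (by omega : offset + right < len)]
    rw [ih (offset + 1) _ (by omega)]
    rw [List.range_succ_eq_map, List.flatMap_cons, List.flatMap_map]
    have hfun : ∀ o : Nat,
        [PySem.List.pyGetD L (left - offset - (o.succ : Nat)) 0,
         PySem.List.pyGetD L (right + offset + (o.succ : Nat)) 0]
      = [PySem.List.pyGetD L (left - (offset + 1) - (o : Int)) 0,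
         PySem.List.pyGetD L (right + (offset + 1) + (o : Int)) 0] := by
      intro o
      have h1 : left - offset - ((o.succ : Nat) : Int) = left - (offset + 1) - (o : Int) := by push_cast; ring
      have h2 : right + offset + ((o.succ : Nat) : Int) = right + (offset + 1) + (o : Int) := by push_cast; ring
      rw [h1, h2]
    rw [List.flatMap_congr (fun o _ => hfun o)]
    simp [List.append_assoc]

-- A's odd-branch loop, likewise.
theorem fLoopOdd_eq (L : List Int) (middle len : Int) :
    ∀ (k : Nat) (offset : Int) (acc : List Int), (len - middle - offset).toNat = k →
    fLoopOdd L middle len offset acc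
      = acc ++ (List.range k).flatMap
          (fun o : Nat => [PySem.List.pyGetD L (middle + offset + (o : Int)) 0,
                     PySem.List.pyGetD L (middle - offset - (o : Int)) 0]) := by
  intro k
  induction k with
  | zero =>
    intro offset acc hk
    rw [fLoopOdd]
    simp only [if_neg (by omega : ¬ offset + middle < len)]
    simp
  | succ k ih =>
    intro offset acc hk
    rw [fLoopOdd]
    simp only [if_pos (by omega : offset + middle < len)]
    rw [ih (offset + 1) _ (by omega)]
    rw [List.range_succ_eq_map, List.flatMap_cons, List.flatMap_map]
    have hfun : ∀ o : Nat,
        [PySem.List.pyGetD L (middle + offset + (o.succ : Nat)) 0,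
         PySem.List.pyGetD L (middle - offset - (o.succ : Nat)) 0]
      = [PySem.List.pyGetD L (middle + (offset + 1) + (o : Int)) 0,
         PySem.List.pyGetD L (middle - (offset + 1) - (o : Int)) 0] := by
      intro o
      have h1 : middle + offset + ((o.succ : Nat) : Int) = middle + (offset + 1) + (o : Int) := by push_cast; ring
      have h2 : middle - offset - ((o.succ : Nat) : Int) = middle - (offset + 1) - (o : Int) := by push_cast; ring
      rw [h1, h2]
    rw [List.flatMap_congr (fun o _ => hfun o)]
    simp [List.append_assoc]

-- ===== VERDICT (by name: the statement is the Claim_ definition above) =====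
theorem f_spec : Claim_equal_f := by
  unfold Claim_equal_f
  intro L _
  unfold Spec_f f f_alt
  by_cases h1 : L.length ≤ 1
  · have hc : ((L.length : Int) = 0 ∨ (L.length : Int) = 1) := by omega
    simp only [if_pos hc, if_pos h1]
  · have hc : ¬((L.length : Int) = 0 ∨ (L.length : Int) = 1) := by omega
    simp only [if_neg hc, if_neg h1]
    have hmod : PySem.Int.mod (L.length : Int) 2 = ((L.length % 2 : Nat) : Int) :=
      PySem.Int.mod_natCast _ _
    have hdiv : PySem.Int.floordiv (L.length : Int) 2 = ((L.length / 2 : Nat) : Int) :=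
      PySem.Int.floordiv_natCast _ _
    by_cases hp : L.length % 2 = 0
    · -- even branch
      have hA : PySem.Int.mod (L.length : Int) 2 = 0 := by rw [hmod, hp]; rfl
      simp only [if_pos hA, hdiv]
      set h := L.length / 2 with hh
      have hn : L.length = 2 * h := by omega
      rw [fLoopEven_eq L _ _ _ h 0 [] (by omega)]
      rw [flatMap_blocks, ← hn]
      simp only [List.nil_append]
      refine List.map_congr_left ?_
      intro j hj
      have hj' : j < 2 * h := by rw [← hn]; exact List.mem_range.mp hj
      unfold fSrc
      rw [if_pos hp]
      by_cases hje : j % 2 = 0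
      · rw [if_pos hje, if_pos hje]
        have hcast : (((h : Int) : Int) - 1 - 0 - ((j / 2 : Nat) : Int))
            = ((h - 1 - j / 2 : Nat) : Int) := by omega
        rw [hcast, PySem.List.pyGetD_natCast]
      · rw [if_neg hje, if_neg hje]
        have hcast : (((h : Int) : Int) + 0 + ((j / 2 : Nat) : Int))
            = ((h + j / 2 : Nat) : Int) := by push_cast; ring
        rw [hcast, PySem.List.pyGetD_natCast]
    · -- odd branch
      have hA : ¬ PySem.Int.mod (L.length : Int) 2 = 0 := by rw [hmod]; omega
      simp only [if_neg hA, hdiv]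
      set m := L.length / 2 with hm
      have hodd : L.length % 2 = 1 := by omega
      have hn : L.length = 2 * m + 1 := by omega
      rw [fLoopOdd_eq L _ _ m 1 _ (by omega)]
      rw [flatMap_blocks]
      rw [hn, List.range_succ_eq_map, List.map_cons, List.map_map]
      have hhead : PySem.List.pyGetD L (m : Int) 0 = L.getD m 0 :=
        PySem.List.pyGetD_natCast _ _ _
      have hsrc0 : fSrc (2 * m + 1) m 0 = m := by unfold fSrc; simp
      rw [hsrc0, hhead]
      simp only [List.cons_append, List.nil_append, List.cons.injEq, true_and]
      refine List.map_congr_left ?_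
      intro j hj
      have hj' : j < 2 * m := List.mem_range.mp hj
      simp only [Function.comp, Nat.succ_eq_add_one]
      unfold fSrc
      have hne : ¬ (2 * m + 1) % 2 = 0 := by omega
      rw [if_neg hne]
      by_cases hje : j % 2 = 0
      · -- j+1 odd: loop's right element m+1+o with o=j/2; src(j+1) = m + (j+2)/2 = m+1+j/2
        have hjp : ¬ (j + 1) % 2 = 0 := by omega
        rw [if_pos hje, if_neg hjp]
        have hcast : (((m : Int) : Int) + 1 + ((j / 2 : Nat) : Int))
            = ((m + (j + 1 + 1) / 2 : Nat) : Int) := by omega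
        rw [hcast, PySem.List.pyGetD_natCast]
      · have hjp : (j + 1) % 2 = 0 := by omega
        rw [if_neg hje, if_pos hjp]
        have hcast : (((m : Int) : Int) - 1 - ((j / 2 : Nat) : Int))
            = ((m - (j + 1) / 2 : Nat) : Int) := by omega
        rw [hcast, PySem.List.pyGetD_natCast]
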